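-- pv_equiv track=rewrite | github.com/SzymonPawlus/8-bit-computer | lexer.py | trimComWhite
-- ===== SOURCE A (Python) =====
-- def trimComWhite(text):
--     temp = text.split("\n")
--     for i in range(0, len(temp)):
--         temp[i] = temp[i].split("//")[0]
--     temp = ''.join(temp)
--     temp = temp.split(";")
--     temp = [x.strip() for x in temp]
--     return [x for x in temp if len(x) > 0]
-- ===== SOURCE B (Python) =====
-- def trimComWhite(text):
--     # Single character-by-character scan: strips //-comments (per line),
--     # drops newlines, splits statements on ';' and strips/filters them.
--     results = []
--     cur = []
--     comment = False
--     i = 0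
--     n = len(text)
--     while i < n:
--         c = text[i]
--         if c == '\n':
--             comment = False
--         elif comment:
--             pass
--         elif c == '/' and i + 1 < n and text[i + 1] == '/':
--             comment = True
--             i += 1
--         elif c == ';':
--             s = ''.join(cur).strip()
--             if s:
--                 results.append(s)
--             cur = []
--         else:
--             cur.append(c)
--         i += 1
--     s = ''.join(cur).strip()
--     if s:
--         results.append(s)
--     return results
-- ===== Notes on version B (the rewrite author's own statement) =====
-- stated objective: alternative
-- what changed: Replaces the split/join/split/strip pipeline (four passes building intermediate lists) by one character-by-character scan with a comment flag and a statement buffer that emits stripped statements directly.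
import Mathlib
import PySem

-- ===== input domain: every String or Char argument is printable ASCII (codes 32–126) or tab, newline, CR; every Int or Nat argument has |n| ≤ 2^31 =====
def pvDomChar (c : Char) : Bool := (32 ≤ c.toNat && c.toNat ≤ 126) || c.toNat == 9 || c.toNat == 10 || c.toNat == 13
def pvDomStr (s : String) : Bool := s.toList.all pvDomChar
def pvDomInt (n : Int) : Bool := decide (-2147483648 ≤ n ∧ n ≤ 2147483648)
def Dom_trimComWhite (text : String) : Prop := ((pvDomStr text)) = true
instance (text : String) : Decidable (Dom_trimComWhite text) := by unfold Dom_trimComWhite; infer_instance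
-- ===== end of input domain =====

-- B replaces A's four-pass split/join/split/strip pipeline by one character scan; same O(n) cost, different decomposition.

-- ===== PORT A =====
-- literal transliteration of A via PySem.Chars (exact Python split/join/strip semantics on the char list)
def trimComWhite (text : String) : List String :=
  let temp0 := PySem.Chars.splitOn text.toList ['\n']                                -- text.split("\n")
  let temp1 := temp0.map (fun line => (PySem.Chars.splitOn line ['/', '/']).headD []) -- temp[i].split("//")[0] (the list is never empty)
  let temp2 := PySem.Chars.join [] temp1                                             -- ''.join(temp)
  let temp3 := PySem.Chars.splitOn temp2 [';']                                       -- temp.split(";")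
  let temp4 := temp3.map (fun x => PySem.Chars.strip x)                              -- [x.strip() for x in temp]
  (temp4.filter (fun x => x.length > 0)).map (fun x => String.ofList x)              -- [x for x in temp if len(x) > 0]

-- ===== PORT B =====
-- flush the current statement buffer (''.join(cur).strip(); append if nonempty)
def bFlush (cur : List Char) (acc : List String) : List String :=
  let s := PySem.Chars.strip cur
  if s.length > 0 then acc ++ [String.ofList s] else acc

-- the while loop of Source B: one scan with a comment flag and a statement buffer
def bScan (l : List Char) (comment : Bool) (cur : List Char) (acc : List String) : List String :=
  match l with
  | [] => bFlush cur acc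
  | c :: rest =>
    if c = '\n' then bScan rest false cur acc
    else if comment then bScan rest comment cur acc
    else if c = '/' ∧ rest.head? = some '/' then bScan rest.tail true cur acc
    else if c = ';' then bScan rest comment [] (bFlush cur acc)
    else bScan rest comment (cur ++ [c]) acc
termination_by l.length
decreasing_by all_goals (simp [List.length_tail]; try omega)

def trimComWhite_alt (text : String) : List String :=
  bScan text.toList false [] []

-- ===== PRECONDITION & SPEC =====
def Spec_trimComWhite (text : String) (out : List String) : Prop := out = trimComWhite_alt text
instance (text : String) (out : List String) : Decidable (Spec_trimComWhite text out) := by unfold Spec_trimComWhite; infer_instance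

-- ===== CLAIM (what is proved, stated in full; the proofs are below) =====
def Claim_equal_trimComWhite : Prop := ∀ (text : String), Dom_trimComWhite text → Spec_trimComWhite text (trimComWhite text)

-- ===== LEMMAS AND PROOFS =====

-- recursive characterization of Python's str.split(sep) (sep ≠ "")
def spl (sep : List Char) (l : List Char) : List (List Char) :=
  match l with
  | [] => [[]]
  | c :: rest =>
    if sep.isPrefixOf (c :: rest) ∧ sep ≠ [] then
      [] :: spl sep (rest.drop (sep.length - 1))
    else (spl sep rest).modifyHead (c :: ·)
termination_by l.length
decreasing_by all_goals (simp [List.length_drop]; try omega)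

lemma spl_ne_nil (sep l : List Char) : spl sep l ≠ [] := by
  fun_induction spl sep l with
  | case1 => simp
  | case2 => simp
  | case3 c rest h ih => simpa using ih

lemma spl_cons_exists (sep l : List Char) : ∃ a t, spl sep l = a :: t := by
  rcases hx : spl sep l with _ | ⟨a, t⟩
  · exact absurd hx (spl_ne_nil sep l)
  · exact ⟨a, t, rfl⟩

lemma go_spec (sep : List Char) (hsep : sep ≠ []) :
    ∀ (fuel : Nat) (l cur : List Char) (acc : List (List Char)), l.length < fuel →
      PySem.Chars.splitOn.go sep fuel l cur acc
        = acc.reverse ++ (spl sep l).modifyHead (cur.reverse ++ ·) := by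
  intro fuel
  induction fuel with
  | zero => intro l cur acc h; omega
  | succ fuel ih =>
    intro l cur acc h
    cases l with
    | nil =>
      rw [PySem.Chars.splitOn.go]
      simp [spl]
      omega
    | cons c rest =>
      by_cases hp : sep.isPrefixOf (c :: rest)
      · have hslen : 1 ≤ sep.length := by
          cases sep with
          | nil => exact absurd rfl hsep
          | cons s ss => simp
        have step : PySem.Chars.splitOn.go sep (fuel+1) (c :: rest) cur acc
            = PySem.Chars.splitOn.go sep fuel ((c :: rest).drop sep.length) [] (cur.reverse :: acc) := by
          rw [PySem.Chars.splitOn.go]; simp [hp]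
        have hdrop : (c :: rest).drop sep.length = rest.drop (sep.length - 1) := by
          cases sep with
          | nil => exact absurd rfl hsep
          | cons s ss => simp
        have hlen : ((c :: rest).drop sep.length).length < fuel := by
          simp only [List.length_drop, List.length_cons] at *
          omega
        rw [step, ih _ _ _ hlen]
        have hspl : spl sep (c :: rest) = [] :: spl sep (rest.drop (sep.length - 1)) := by
          rw [spl]; simp [hp, hsep]
        rw [hspl, hdrop]
        obtain ⟨a, t, hat⟩ := spl_cons_exists sep (rest.drop (sep.length - 1))
        rw [hat]
        simp
      · have step : PySem.Chars.splitOn.go sep (fuel+1) (c :: rest) cur acc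
            = PySem.Chars.splitOn.go sep fuel rest (c :: cur) acc := by
          rw [PySem.Chars.splitOn.go]; simp [hp]
        have hlen : rest.length < fuel := by
          simp only [List.length_cons] at h; omega
        rw [step, ih _ _ _ hlen]
        have hspl : spl sep (c :: rest) = (spl sep rest).modifyHead (c :: ·) := by
          rw [spl]; simp [hp]
        rw [hspl]
        obtain ⟨a, t, hat⟩ := spl_cons_exists sep rest
        rw [hat]
        simp

lemma splitOn_eq_spl (l sep : List Char) (hsep : sep ≠ []) :
    PySem.Chars.splitOn l sep = spl sep l := by
  have := go_spec sep hsep (l.length + 1) l [] [] (by omega)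
  rw [PySem.Chars.splitOn, this]
  obtain ⟨a, t, hat⟩ := spl_cons_exists sep l
  rw [hat]; simp

-- splitting on a single-character separator, one step
lemma spl_single_cons (s c : Char) (rest : List Char) :
    spl [s] (c :: rest)
      = if c = s then [] :: spl [s] rest else (spl [s] rest).modifyHead (c :: ·) := by
  rw [spl]
  by_cases hc : c = s
  · subst hc; simp [List.isPrefixOf]
  · rw [if_neg, if_neg hc]
    intro hcon
    have h1 := hcon.1
    simp [List.isPrefixOf] at h1
    exact hc h1.symm

-- ''.join = flatten
lemma join_empty (parts : List (List Char)) : PySem.Chars.join [] parts = parts.flatten := by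
  induction parts with
  | nil => simp [PySem.Chars.join_nil]
  | cons p rest ih =>
    cases rest with
    | nil => simp [PySem.Chars.join, List.intercalate]
    | cons q r =>
      rw [PySem.Chars.join_cons_cons]
      simp only [List.flatten_cons]
      rw [ih]
      simp

-- the chars of a line before its first "//"
def upTo (l : List Char) : List Char :=
  match l with
  | [] => []
  | c :: rest => if c = '/' ∧ rest.head? = some '/' then [] else c :: upTo rest

lemma upTo_cons (c : Char) (rest : List Char) :
    upTo (c :: rest) = if c = '/' ∧ rest.head? = some '/' then [] else c :: upTo rest := by
  rw [upTo]

lemma head_spl_slash : ∀ (n : Nat) (l : List Char), l.length ≤ n →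
    (spl ['/', '/'] l).headD [] = upTo l := by
  intro n
  induction n with
  | zero =>
    intro l h
    have : l = [] := by cases l <;> simp_all
    subst this
    simp [spl, upTo]
  | succ n ih =>
    intro l h
    cases l with
    | nil => simp [spl, upTo]
    | cons c rest =>
      simp only [List.length_cons] at h
      by_cases hsl : c = '/' ∧ rest.head? = some '/'
      · obtain ⟨hc, hh⟩ := hsl
        cases rest with
        | nil => simp at hh
        | cons d r =>
          have hd : d = '/' := by simpa using hh
          subst hc; subst hd
          rw [spl, upTo_cons]
          simp [List.isPrefixOf]
      · have hpre : ¬ (['/', '/'].isPrefixOf (c :: rest) = true) := by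
          cases rest with
          | nil => simp [List.isPrefixOf]
          | cons d r =>
            simp only [List.isPrefixOf, Bool.and_eq_true, beq_iff_eq]
            intro hcon
            exact hsl ⟨hcon.1.symm, by simp [hcon.2.1.symm]⟩
        rw [spl, upTo_cons]
        rw [if_neg (by exact fun hcon => hpre hcon.1), if_neg hsl]
        obtain ⟨a, t, hat⟩ := spl_cons_exists ['/', '/'] rest
        have hrec := ih rest (by omega)
        rw [hat] at hrec ⊢
        simp only [List.modifyHead_cons, List.headD_cons] at hrec ⊢
        rw [hrec]

-- comment-and-newline remover: what A's first three pipeline stages compute, fused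
def g (comment : Bool) (l : List Char) : List Char :=
  match l with
  | [] => []
  | c :: rest =>
    if c = '\n' then g false rest
    else if comment then g comment rest
    else if c = '/' ∧ rest.head? = some '/' then g true rest.tail
    else c :: g false rest
termination_by l.length
decreasing_by all_goals (simp [List.length_tail]; try omega)

-- A's comment pass + join equals g (joint statement for the two comment states)
lemma upTo_nil : upTo [] = [] := by rw [upTo]

lemma headD_head_spl_single (s : Char) (rest : List Char) :
    ((spl [s] rest).headD []).head? = if rest.head? = some s then none else rest.head? := by
  cases rest with
  | nil =>
    rw [show spl [s] ([] : List Char) = [[]] from by rw [spl]]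
    simp
  | cons c r =>
    rw [spl_single_cons]
    by_cases hcs : c = s
    · simp [hcs]
    · obtain ⟨a', t', hat'⟩ := spl_cons_exists [s] r
      rw [if_neg hcs, hat']
      simp [hcs]

lemma join_upTo_spl : ∀ (n : Nat) (l : List Char), l.length ≤ n →
    (((spl ['\n'] l).map upTo).flatten = g false l)
    ∧ ((((spl ['\n'] l).tail).map upTo).flatten = g true l) := by
  intro n
  induction n with
  | zero =>
    intro l h
    have : l = [] := by cases l <;> simp_all
    subst this
    simp [spl, upTo_nil, g]
  | succ n ih =>
    intro l h
    cases l with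
    | nil => simp [spl, upTo_nil, g]
    | cons c rest =>
      simp only [List.length_cons] at h
      by_cases hc : c = '\n'
      · subst hc
        rw [spl_single_cons, g, g]
        have h1 := (ih rest (by omega)).1
        simp [upTo_nil, h1]
      · rw [spl_single_cons]
        simp only [if_neg hc]
        obtain ⟨a, t, hat⟩ := spl_cons_exists ['\n'] rest
        have ha : a.head? = if rest.head? = some '\n' then none else rest.head? := by
          have hh := headD_head_spl_single '\n' rest
          rw [hat] at hh
          simpa using hh
        rw [hat]
        simp only [List.modifyHead_cons, List.map_cons, List.flatten_cons, List.tail_cons]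
        constructor
        · -- comment = false
          rw [g]
          simp only [if_neg hc]
          simp only [Bool.false_eq_true, if_false]
          by_cases hsl : c = '/' ∧ rest.head? = some '/'
          · -- "//" starts here
            have ha' : a.head? = some '/' := by
              rw [ha, hsl.2]
              simp
            rw [if_pos hsl]
            rw [upTo_cons, if_pos ⟨hsl.1, ha'⟩]
            simp only [List.nil_append]
            have hrec := (ih rest (by omega)).2
            rw [hat] at hrec
            simp only [List.tail_cons] at hrec
            rw [hrec]
            -- g true rest = g true rest.tail
            cases rest with
            | nil => simp at hsl
            | cons d r =>
              have hd : ¬ d = '\n' := by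
                have : d = '/' := by simpa using hsl.2
                subst this; decide
              rw [g]
              simp [hd]
          · -- ordinary character
            simp only [if_neg hsl]
            rw [upTo_cons]
            have hna : ¬ (c = '/' ∧ a.head? = some '/') := by
              intro hcon
              apply hsl
              refine ⟨hcon.1, ?_⟩
              have h2 := hcon.2
              rw [ha] at h2
              by_cases hr : rest.head? = some '\n'
              · rw [if_pos hr] at h2
                exact absurd h2 (by simp)
              · rw [if_neg hr] at h2
                exact h2
            rw [if_neg hna]
            simp only [List.cons_append]
            have hrec := (ih rest (by omega)).1
            rw [hat] at hrec
            simp only [List.map_cons, List.flatten_cons] at hrec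
            rw [hrec]
        · -- comment = true
          rw [g]
          simp only [if_neg hc]
          have hrec := (ih rest (by omega)).2
          rw [hat] at hrec
          simpa using hrec

-- statement splitter on comment-free text (the ';'/flush part of bScan)
def sScan (l : List Char) (cur : List Char) (acc : List String) : List String :=
  match l with
  | [] => bFlush cur acc
  | c :: rest =>
    if c = ';' then sScan rest [] (bFlush cur acc)
    else sScan rest (cur ++ [c]) acc

def pipe (m : List Char) : List String :=
  (((spl [';'] m).map PySem.Chars.strip).filter (fun x => x.length > 0)).map (fun x => String.ofList x)

lemma spl_no_sep (s : Char) (l : List Char) (h : s ∉ l) : spl [s] l = [l] := by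
  induction l with
  | nil => rw [spl]
  | cons c rest ih =>
    simp at h
    rw [spl_single_cons, if_neg (Ne.symm h.1), ih h.2]
    rfl

lemma spl_append_cons (s : Char) (cur r : List Char) (h : s ∉ cur) :
    spl [s] (cur ++ s :: r) = cur :: spl [s] r := by
  induction cur with
  | nil =>
    simp only [List.nil_append]
    rw [spl_single_cons, if_pos rfl]
  | cons c cur' ih =>
    simp at h
    simp only [List.cons_append]
    rw [spl_single_cons, if_neg (Ne.symm h.1), ih h.2]
    rfl

lemma sScan_eq_pipe (l : List Char) : ∀ (cur : List Char) (acc : List String), ';' ∉ cur →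
    sScan l cur acc = acc ++ pipe (cur ++ l) := by
  induction l with
  | nil =>
    intro cur acc h
    rw [sScan]
    simp only [List.append_nil]
    unfold pipe
    rw [spl_no_sep ';' cur h]
    by_cases hp : 0 < (PySem.Chars.strip cur).length
    · simp [bFlush, hp]
    · simp [bFlush, hp]
  | cons c rest ih =>
    intro cur acc h
    rw [sScan]
    by_cases hc : c = ';'
    · subst hc
      rw [if_pos rfl, ih [] (bFlush cur acc) (by simp)]
      unfold pipe
      rw [spl_append_cons ';' cur rest h]
      simp only [List.map_cons]
      rw [List.filter_cons]
      by_cases hp : 0 < (PySem.Chars.strip cur).length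
      · simp [bFlush, hp]
      · simp [bFlush, hp]
    · simp only [if_neg hc]
      rw [ih (cur ++ [c]) acc (by simp [h]; exact fun he => hc he.symm)]
      simp

lemma bScan_eq_sScan : ∀ (n : Nat) (l : List Char), l.length ≤ n →
    ∀ (comment : Bool) (cur : List Char) (acc : List String),
      bScan l comment cur acc = sScan (g comment l) cur acc := by
  intro n
  induction n with
  | zero =>
    intro l h comment cur acc
    have : l = [] := by cases l <;> simp_all
    subst this
    rw [bScan, g, sScan]
  | succ n ih =>
    intro l h comment cur acc
    cases l with
    | nil => rw [bScan, g, sScan]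
    | cons c rest =>
      simp only [List.length_cons] at h
      rw [bScan, g]
      by_cases hc : c = '\n'
      · simp only [if_pos hc]
        exact ih rest (by omega) false cur acc
      · simp only [if_neg hc]
        cases comment with
        | true =>
          rw [if_pos rfl]
          exact ih rest (by omega) true cur acc
        | false =>
          simp only [Bool.false_eq_true, if_false]
          by_cases hsl : c = '/' ∧ rest.head? = some '/'
          · simp only [if_pos hsl]
            exact ih rest.tail (by simp only [List.length_tail]; omega) true cur acc
          · simp only [if_neg hsl]
            by_cases hsemi : c = ';'
            · simp only [if_pos hsemi]
              rw [sScan, if_pos hsemi]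
              exact ih rest (by omega) false [] (bFlush cur acc)
            · simp only [if_neg hsemi]
              rw [sScan, if_neg hsemi]
              exact ih rest (by omega) false (cur ++ [c]) acc

-- ===== VERDICT (by name: the statement is the Claim_ definition above) =====
theorem trimComWhite_spec : Claim_equal_trimComWhite := by
  intro text _
  unfold Spec_trimComWhite trimComWhite_alt
  rw [bScan_eq_sScan text.toList.length text.toList le_rfl,
      sScan_eq_pipe _ _ _ (by simp)]
  simp only [trimComWhite]
  rw [splitOn_eq_spl text.toList ['\n'] (by simp)]
  have hmap : (spl ['\n'] text.toList).map
      (fun line => (PySem.Chars.splitOn line ['/', '/']).headD [])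
      = (spl ['\n'] text.toList).map upTo := by
    refine List.map_congr_left (fun line _ => ?_)
    rw [splitOn_eq_spl _ _ (by simp), head_spl_slash line.length line le_rfl]
  rw [hmap, join_empty, (join_upTo_spl text.toList.length text.toList le_rfl).1]
  rw [splitOn_eq_spl (g false text.toList) [';'] (by simp)]
  simp [pipe]
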